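-- pv_equiv track=rewrite | github.com/jdomeracki/SBH-GeneticAlgorithm | GA-implementation.py | get_num_of_ncts
-- ===== SOURCE A (Python) =====
-- def get_num_of_ncts(optimized, keys, length):
--     num_of_o_ncts = 0
--     for key in keys:
--         x = len(optimized[key])-length
--         if (x == 0):
--             num_of_o_ncts += 1
--         else:
--             num_of_o_ncts += 1+x
--     return num_of_o_ncts
-- ===== SOURCE B (Python) =====
-- def get_num_of_ncts(optimized, keys, length):
--     counts = {}
--     for key in keys:
--         counts[key] = counts.get(key, 0) + 1
--     total = 0
--     for key, c in counts.items():
--         total += c * (1 + len(optimized[key]) - length)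
--     return total
-- ===== Notes on version B (the rewrite author's own statement) =====
-- stated objective: alternative
-- what changed: B first builds a counter dict of key multiplicities, then sums over the DISTINCT keys only, doing one optimized-lookup per distinct key and weighting its contribution 1+len-length by the multiplicity, instead of A's per-occurrence branching loop.
import Mathlib
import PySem

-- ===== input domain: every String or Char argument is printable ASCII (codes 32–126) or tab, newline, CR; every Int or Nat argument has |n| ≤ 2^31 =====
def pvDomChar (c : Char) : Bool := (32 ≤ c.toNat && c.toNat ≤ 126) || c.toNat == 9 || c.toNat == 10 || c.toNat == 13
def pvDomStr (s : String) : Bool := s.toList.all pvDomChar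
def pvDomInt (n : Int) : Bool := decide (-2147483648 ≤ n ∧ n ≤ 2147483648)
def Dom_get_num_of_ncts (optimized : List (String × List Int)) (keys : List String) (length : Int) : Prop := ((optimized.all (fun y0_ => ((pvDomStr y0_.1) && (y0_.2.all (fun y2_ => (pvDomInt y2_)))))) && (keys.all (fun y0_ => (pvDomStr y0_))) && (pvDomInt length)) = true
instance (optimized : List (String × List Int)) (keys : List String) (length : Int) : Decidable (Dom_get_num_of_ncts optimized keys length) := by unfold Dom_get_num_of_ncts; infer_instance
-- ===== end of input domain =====

-- B counts key multiplicities in a dict first, then sums c*(1+len-length) over the distinct keys only (one lookup per distinct key); objective: alternative (grouping-by-counter instead of A's per-occurrence branching loop).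

-- ===== PORT A =====
-- value looked up for a key (A raises KeyError when missing; Pre_ excludes that, getD [] is unreachable inside Pre_)
def pvLookup (optimized : List (String × List Int)) (key : String) : List Int :=
  ((PySem.Dict.mk optimized).get? key).getD []

def get_num_of_ncts (optimized : List (String × List Int)) (keys : List String) (length : Int) : Int :=
  keys.foldl (fun num_of_o_ncts key =>
    let x : Int := (pvLookup optimized key).length - length
    if x = 0 then num_of_o_ncts + 1 else num_of_o_ncts + (1 + x)) 0

-- ===== PORT B =====
def get_num_of_ncts_alt (optimized : List (String × List Int)) (keys : List String) (length : Int) : Int :=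
  let counts : PySem.Dict String Int :=
    keys.foldl (fun d key => d.insert key (d.getD key 0 + 1)) PySem.Dict.empty
  counts.items.foldl (fun total kc =>
    total + kc.2 * (1 + ((pvLookup optimized kc.1).length : Int) - length)) 0

-- ===== PRECONDITION & SPEC =====
-- Pre_ excludes exactly the inputs where Python A raises KeyError: some key in keys absent from optimized (B raises KeyError there too).
def Pre_get_num_of_ncts (optimized : List (String × List Int)) (keys : List String) (length : Int) : Prop :=
  (keys.all (fun k => ((PySem.Dict.mk optimized).get? k).isSome)) = true
instance (optimized : List (String × List Int)) (keys : List String) (length : Int) : Decidable (Pre_get_num_of_ncts optimized keys length) := by unfold Pre_get_num_of_ncts; infer_instance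

def pvWitness_get_num_of_ncts : (List (String × List Int)) × List String × Int :=
  ([("ab", [1, 2]), ("cd", [3])], ["cd", "ab", "cd"], 2)

def Spec_get_num_of_ncts (optimized : List (String × List Int)) (keys : List String) (length : Int) (out : Int) : Prop := out = get_num_of_ncts_alt optimized keys length
instance (optimized : List (String × List Int)) (keys : List String) (length : Int) (out : Int) : Decidable (Spec_get_num_of_ncts optimized keys length out) := by unfold Spec_get_num_of_ncts; infer_instance

-- ===== CLAIM =====
def Claim_equal_get_num_of_ncts : Prop := ∀ (optimized : List (String × List Int)) (keys : List String) (length : Int), Dom_get_num_of_ncts optimized keys length → Pre_get_num_of_ncts optimized keys length → Spec_get_num_of_ncts optimized keys length (get_num_of_ncts optimized keys length)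

-- ===== LEMMAS AND PROOFS =====
-- A's branching fold is the plain sum of the per-key contributions (1 + 0 = 1 collapses the branch).
theorem foldA_eq (optimized : List (String × List Int)) (length : Int) :
    ∀ (ks : List String) (a : Int),
      ks.foldl (fun num_of_o_ncts key =>
        let x : Int := (pvLookup optimized key).length - length
        if x = 0 then num_of_o_ncts + 1 else num_of_o_ncts + (1 + x)) a
      = a + (ks.map (fun k => 1 + ((pvLookup optimized k).length : Int) - length)).sum := by
  intro ks
  induction ks with
  | nil => intro a; simp
  | cons k ks ih =>
    intro a
    simp only [List.foldl_cons, List.map_cons, List.sum_cons, ih]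
    split_ifs with h
    · omega
    · ring

-- on a nodup list containing x, the 0-elsewhere sum picks out f x
theorem sum_map_ite_pick (f : String → Int) :
    ∀ (ds : List String) (x : String), ds.Nodup → x ∈ ds →
      (ds.map (fun d => if d = x then f d else 0)).sum = f x := by
  intro ds
  induction ds with
  | nil => intro x _ hx; cases hx
  | cons d ds ih =>
    intro x hnd hx
    simp only [List.map_cons, List.sum_cons]
    rcases List.mem_cons.mp hx with rfl | hx'
    · have : (ds.map (fun d' => if d' = x then f d' else 0)).sum = 0 := by
        apply List.sum_eq_zero
        intro y hy
        rcases List.mem_map.mp hy with ⟨d', hd', rfl⟩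
        have : d' ≠ x := fun h => (List.nodup_cons.mp hnd).1 (h ▸ hd')
        simp [this]
      simp [this]
    · have hne : d ≠ x := fun h => (List.nodup_cons.mp hnd).1 (h ▸ hx')
      rw [ih x (List.nodup_cons.mp hnd).2 hx']
      simp [hne]

-- grouping by multiplicity: summing count·f over a nodup support equals summing f over the list
theorem sum_count_mul (f : String → Int) :
    ∀ (xs ds : List String), ds.Nodup → (∀ x ∈ xs, x ∈ ds) →
      (ds.map (fun d => (xs.count d : Int) * f d)).sum = (xs.map f).sum := by
  intro xs
  induction xs with
  | nil => intro ds _ _; simp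
  | cons x xs ih =>
    intro ds hnd hsub
    have hx : x ∈ ds := hsub x (List.mem_cons_self)
    have hstep : ∀ d : String, ((x :: xs).count d : Int) * f d
        = (xs.count d : Int) * f d + (if d = x then f d else 0) := by
      intro d
      by_cases h : d = x
      · subst h; rw [List.count_cons]; simp; ring
      · rw [List.count_cons]
        have : (x == d) = false := by simp [Ne.symm h]
        simp [this, h]
    calc (ds.map (fun d => ((x :: xs).count d : Int) * f d)).sum
        = (ds.map (fun d => (xs.count d : Int) * f d + (if d = x then f d else 0))).sum := by
          congr 1; exact List.map_congr_left (fun d _ => hstep d)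
      _ = (ds.map (fun d => (xs.count d : Int) * f d)).sum
          + (ds.map (fun d => if d = x then f d else 0)).sum := by
          rw [← List.sum_map_add]
      _ = (xs.map f).sum + f x := by
          rw [ih ds hnd (fun y hy => hsub y (List.mem_cons_of_mem _ hy)),
              sum_map_ite_pick f ds x hnd hx]
      _ = ((x :: xs).map f).sum := by simp [List.map_cons]; ring

-- ===== VERDICT =====
theorem get_num_of_ncts_spec : Claim_equal_get_num_of_ncts := by
  intro optimized keys length _ _
  unfold Spec_get_num_of_ncts get_num_of_ncts get_num_of_ncts_alt
  rw [foldA_eq, PySem.Dict.foldl_insert_getD_add_one_eq_counter,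
      PySem.List.foldl_add _ (fun kc : String × Int =>
        kc.2 * (1 + ((pvLookup optimized kc.1).length : Int) - length)),
      PySem.Dict.items_counter]
  rw [List.map_map]
  have h := sum_count_mul (fun k => 1 + ((pvLookup optimized k).length : Int) - length)
    keys (PySem.Set.ofList keys) (PySem.Set.nodup_ofList keys)
    (fun x hx => (PySem.Set.mem_ofList keys x).mpr hx)
  simp only [Function.comp_def]
  rw [h]
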